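-- pv_equiv track=rewrite | github.com/shivam-singh-code/DSA | HashTable/challenges/Ex1.py | item_in_common_optimized
-- ===== SOURCE A (Python) =====
-- def item_in_common_optimized(list1, list2):
--     list_dict = {}
--     for i in list1:
--         list_dict[i] = True
--     for j in list2:
--         if j in list_dict:
--             return True
--     return False
-- ===== SOURCE B (Python) =====
-- def item_in_common_optimized(list1, list2):
--     # alternative: sort both lists and do a two-pointer merge scan, no hashing
--     a = sorted(list1)
--     b = sorted(list2)
--     i = j = 0
--     while i < len(a) and j < len(b):
--         if a[i] == b[j]:
--             return True
--         if a[i] < b[j]: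
--             i += 1
--         else:
--             j += 1
--     return False
-- ===== Notes on version B (the rewrite author's own statement) =====
-- stated objective: alternative
-- what changed: Replaces the hash-table build plus membership-scan with sorting both lists and a two-pointer merge scan that advances the smaller head until a match or exhaustion.
import Mathlib
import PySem

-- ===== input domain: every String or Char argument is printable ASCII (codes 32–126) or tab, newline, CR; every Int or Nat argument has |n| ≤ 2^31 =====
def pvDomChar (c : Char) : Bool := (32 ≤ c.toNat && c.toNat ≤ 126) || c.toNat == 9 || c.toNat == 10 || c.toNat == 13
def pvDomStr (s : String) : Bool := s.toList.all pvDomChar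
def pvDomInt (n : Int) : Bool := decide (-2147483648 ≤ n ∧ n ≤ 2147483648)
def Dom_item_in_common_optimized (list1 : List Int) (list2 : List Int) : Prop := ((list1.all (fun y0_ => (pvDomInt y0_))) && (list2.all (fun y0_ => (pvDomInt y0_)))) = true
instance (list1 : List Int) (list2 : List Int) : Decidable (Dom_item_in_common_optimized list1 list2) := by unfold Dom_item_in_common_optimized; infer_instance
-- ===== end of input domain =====

-- B replaces A's dict-build plus membership-scan with sorting both lists and a two-pointer merge scan (alternative algorithm, no hashing).
-- ===== PORT A =====
def pvScanA (d : PySem.Dict Int Bool) : List Int → Bool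
  | [] => false
  | j :: rest => if d.contains j then true else pvScanA d rest

def item_in_common_optimized (list1 : List Int) (list2 : List Int) : Bool :=
  let list_dict := list1.foldl (fun d i => d.insert i true) (PySem.Dict.empty : PySem.Dict Int Bool)
  pvScanA list_dict list2

-- ===== PORT B =====
-- the two-pointer while loop of Source B, as structural recursion on the two sorted lists
def pvMergeScan : List Int → List Int → Bool
  | [], _ => false
  | _ :: _, [] => false
  | a :: as_, b :: bs =>
    if a == b then true
    else if a < b then pvMergeScan as_ (b :: bs)
    else pvMergeScan (a :: as_) bs

def item_in_common_optimized_alt (list1 : List Int) (list2 : List Int) : Bool :=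
  pvMergeScan (PySem.List.sorted list1 (fun x => x) false) (PySem.List.sorted list2 (fun x => x) false)

-- ===== PRECONDITION & SPEC =====
def Spec_item_in_common_optimized (list1 : List Int) (list2 : List Int) (out : Bool) : Prop := out = item_in_common_optimized_alt list1 list2
instance (list1 : List Int) (list2 : List Int) (out : Bool) : Decidable (Spec_item_in_common_optimized list1 list2 out) := by unfold Spec_item_in_common_optimized; infer_instance

-- ===== CLAIM =====
def Claim_equal_item_in_common_optimized : Prop := ∀ (list1 : List Int) (list2 : List Int), Dom_item_in_common_optimized list1 list2 → Spec_item_in_common_optimized list1 list2 (item_in_common_optimized list1 list2)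

-- ===== LEMMAS AND PROOFS =====
-- A's scan over list2 returns true iff some element of list2 is a key of the dict.
theorem pvScanA_eq_any (d : PySem.Dict Int Bool) (l : List Int) :
    pvScanA d l = l.any (fun j => d.contains j) := by
  induction l with
  | nil => rfl
  | cons j rest ih =>
    simp only [pvScanA, List.any_cons, ih]
    by_cases h : d.contains j <;> simp [h]

-- the dict A builds from list1 has exactly the elements of list1 as keys
theorem contains_dict_iff (list1 : List Int) (k : Int) :
    (list1.foldl (fun d i => d.insert i true) (PySem.Dict.empty : PySem.Dict Int Bool)).contains k
      ↔ k ∈ list1 := by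
  rw [PySem.Dict.contains_iff_mem_keys, PySem.Dict.keys_foldl_insert list1 (fun _ _ => true) PySem.Dict.empty]
  simp [PySem.Dict.empty, PySem.Set.update_eq_foldl, ← PySem.Set.ofList_eq_foldl, PySem.Set.mem_ofList]

-- correctness of the merge scan on sorted inputs: true iff the lists share an element
theorem pvMergeScan_eq_true_iff (xs ys : List Int)
    (hx : xs.Pairwise (· ≤ ·)) (hy : ys.Pairwise (· ≤ ·)) :
    pvMergeScan xs ys = true ↔ ∃ v, v ∈ xs ∧ v ∈ ys := by
  induction xs generalizing ys with
  | nil => simp [pvMergeScan]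
  | cons a as_ ihx =>
    induction ys with
    | nil => simp [pvMergeScan]
    | cons b bs ihy =>
      have hx' := List.Pairwise.of_cons hx
      have hy' := List.Pairwise.of_cons hy
      have hxa : ∀ v ∈ as_, a ≤ v := fun v hv => (List.pairwise_cons.mp hx).1 v hv
      have hyb : ∀ v ∈ bs, b ≤ v := fun v hv => (List.pairwise_cons.mp hy).1 v hv
      simp only [pvMergeScan]
      by_cases hab : a = b
      · simp [hab]
      · simp only [beq_iff_eq, hab, if_false]
        by_cases hlt : a < b
        · rw [if_pos hlt, ihx (b :: bs) hx' hy]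
          constructor
          · rintro ⟨v, hv1, hv2⟩; exact ⟨v, List.mem_cons_of_mem _ hv1, hv2⟩
          · rintro ⟨v, hv1, hv2⟩
            rcases List.mem_cons.mp hv1 with rfl | hv1'
            · -- v = a ∈ b :: bs: impossible since a < b and a < every later element
              rcases List.mem_cons.mp hv2 with rfl | hv2'
              · exact absurd rfl hab
              · exact absurd (hyb v hv2') (not_le.mpr hlt)
            · exact ⟨v, hv1', hv2⟩
        · rw [if_neg hlt, ihy hy']
          have hba : b < a := lt_of_le_of_ne (not_lt.mp hlt) (fun h => hab h.symm)
          constructor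
          · rintro ⟨v, hv1, hv2⟩; exact ⟨v, hv1, List.mem_cons_of_mem _ hv2⟩
          · rintro ⟨v, hv1, hv2⟩
            rcases List.mem_cons.mp hv2 with rfl | hv2'
            · rcases List.mem_cons.mp hv1 with rfl | hv1'
              · exact absurd rfl hab
              · exact absurd (hxa v hv1') (not_le.mpr hba)
            · exact ⟨v, hv1, hv2'⟩

-- ===== VERDICT =====
theorem item_in_common_optimized_spec : Claim_equal_item_in_common_optimized := by
  intro list1 list2 _
  unfold Spec_item_in_common_optimized item_in_common_optimized item_in_common_optimized_alt
  simp only [pvScanA_eq_any]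
  have hx := PySem.List.sorted_pairwise (xs := list1) (key := fun x => x)
  have hy := PySem.List.sorted_pairwise (xs := list2) (key := fun x => x)
  rcases Bool.eq_false_or_eq_true (pvMergeScan (PySem.List.sorted list1 (fun x => x) false) (PySem.List.sorted list2 (fun x => x) false)) with h | h
  · rw [h]
    obtain ⟨v, hv1, hv2⟩ := (pvMergeScan_eq_true_iff _ _ hx hy).mp h
    simp only [List.any_eq_true]
    exact ⟨v, (PySem.List.mem_sorted _ _ _ _).mp hv2, (contains_dict_iff _ _).mpr ((PySem.List.mem_sorted _ _ _ _).mp hv1)⟩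
  · rw [h]
    have := (not_iff_not.mpr (pvMergeScan_eq_true_iff _ _ hx hy)).mp (by simp [h])
    simp only [List.any_eq_false]
    intro j hj hc
    rw [contains_dict_iff] at hc
    exact this ⟨j, (PySem.List.mem_sorted _ _ _ _).mpr hc, (PySem.List.mem_sorted _ _ _ _).mpr hj⟩
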